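-- pv_equiv track=rewrite | github.com/984-ISHU/kactl-python | content/numerical/FastSubsetTransform.py | subset_conv
-- ===== SOURCE A (Python) =====
-- def fst(a, inv, op='AND'):
--     """
--     Fast Subset Transform.
--
--     Args:
--         a: Input array (size must be power of 2). Modified in-place.
--         inv: True for inverse transform
--         op: 'AND', 'OR', or 'XOR'
--     """
--     n = len(a)
--     step = 1
--
--     while step < n:
--         for i in range(0, n, 2 * step):
--             for j in range(i, i + step):
--                 u, v = a[j], a[j + step]
--
--                 if op == 'AND':
--                     if inv:
--                         a[j], a[j + step] = v - u, u
--                     else: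
--                         a[j], a[j + step] = v, u + v
--                 elif op == 'OR':
--                     if inv:
--                         a[j], a[j + step] = v, u - v
--                     else:
--                         a[j], a[j + step] = u + v, u
--                 elif op == 'XOR':
--                     a[j], a[j + step] = u + v, u - v
--
--         step *= 2
--
--     # XOR requires division by n for inverse
--     if inv and op == 'XOR':
--         for i in range(n):
--             a[i] //= n
--
-- def subset_conv(a, b, op='AND'):
--     """
--     Compute subset convolution.
--
--     Args:
--         a, b: Input arrays (size must be power of 2)
--         op: 'AND', 'OR', or 'XOR'
--
--     Returns:
--         Convolution result
--     """
--     a = a[:]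
--     b = b[:]
--
--     fst(a, False, op)
--     fst(b, False, op)
--
--     for i in range(len(a)):
--         a[i] *= b[i]
--
--     fst(a, True, op)
--     return a
-- ===== SOURCE B (Python) =====
-- def _fst(arr, inv, op):
--     """Recursive divide-and-conquer fast subset transform; returns a new list.
--     XOR-inverse division by n is NOT done here (caller does it once at the top)."""
--     if len(arr) <= 1:
--         return arr
--     m = len(arr) // 2
--     lo = _fst(arr[:m], inv, op)
--     hi = _fst(arr[m:], inv, op)
--     res_lo, res_hi = [], []
--     for u, v in zip(lo, hi):
--         if op == 'AND':
--             x, y = (v - u, u) if inv else (v, u + v)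
--         elif op == 'OR':
--             x, y = (v, u - v) if inv else (u + v, u)
--         elif op == 'XOR':
--             x, y = (u + v, u - v)
--         else:
--             x, y = (u, v)
--         res_lo.append(x)
--         res_hi.append(y)
--     return res_lo + res_hi
--
--
-- def subset_conv(a, b, op='AND'):
--     fa = _fst(list(a), False, op)
--     fb = _fst(list(b), False, op)
--     prod = [x * y for x, y in zip(fa, fb)]
--     out = _fst(prod, True, op)
--     if op == 'XOR':
--         n = len(out)
--         out = [x // n for x in out]
--     return out
-- ===== Notes on version B (the rewrite author's own statement) =====
-- stated objective: alternative
-- what changed: The in-place bottom-up step-doubling butterfly loops of the fast subset transform are replaced by a recursive divide-and-conquer transform that splits the array into halves, recurses, and combines elementwise with the same op-specific butterfly, with the XOR-inverse floor division applied once at the top; Pre_ excludes only the inputs where A raises IndexError (a length that is neither 0 nor a power of two, or len(a) > len(b)).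
import Mathlib
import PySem

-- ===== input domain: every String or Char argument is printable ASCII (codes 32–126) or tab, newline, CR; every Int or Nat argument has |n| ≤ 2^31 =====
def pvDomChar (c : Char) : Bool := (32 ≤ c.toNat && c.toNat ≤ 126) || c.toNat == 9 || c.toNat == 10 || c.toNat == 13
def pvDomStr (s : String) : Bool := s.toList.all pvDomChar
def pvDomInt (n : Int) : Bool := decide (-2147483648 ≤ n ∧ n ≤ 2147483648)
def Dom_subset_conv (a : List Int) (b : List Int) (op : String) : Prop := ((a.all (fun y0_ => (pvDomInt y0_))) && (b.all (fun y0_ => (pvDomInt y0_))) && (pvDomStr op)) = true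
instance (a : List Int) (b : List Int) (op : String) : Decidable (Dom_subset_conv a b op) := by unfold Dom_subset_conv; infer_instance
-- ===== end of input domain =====

-- B replaces A's bottom-up step-doubling butterfly loops by a recursive divide-and-conquer
-- transform (objective: alternative decomposition, same asymptotic cost).

-- ===== PORT A =====
-- inner loop body: u, v = a[j], a[j+step]; branch on op/inv; write a[j], a[j+step]
-- (pyGetD/pySetD are exact here: under Pre_ every index j, j+step is in range)
def fstBody (op : String) (inv : Bool) (step : Int) (a : List Int) (j : Int) : List Int :=
  let u := PySem.List.pyGetD a j 0
  let v := PySem.List.pyGetD a (j + step) 0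
  if op == "AND" then
    if inv then PySem.List.pySetD (PySem.List.pySetD a j (v - u)) (j + step) u
    else PySem.List.pySetD (PySem.List.pySetD a j v) (j + step) (u + v)
  else if op == "OR" then
    if inv then PySem.List.pySetD (PySem.List.pySetD a j v) (j + step) (u - v)
    else PySem.List.pySetD (PySem.List.pySetD a j (u + v)) (j + step) u
  else if op == "XOR" then
    PySem.List.pySetD (PySem.List.pySetD a j (u + v)) (j + step) (u - v)
  else a

-- for i in range(0, n, 2*step): for j in range(i, i+step): ...
def fstPass (op : String) (inv : Bool) (n : Int) (step : Int) (a : List Int) : List Int :=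
  (PySem.List.pyRange 0 n (2 * step)).foldl
    (fun x i => (PySem.List.pyRange i (i + step) 1).foldl (fun y j => fstBody op inv step y j) x) a

-- while step < n: ...; step *= 2   (the 0 < step guard is a totality guard only; step starts at 1)
def fstWhile (op : String) (inv : Bool) (n : Int) (step : Int) (a : List Int) : List Int :=
  if h : 0 < step ∧ step < n then
    fstWhile op inv n (2 * step) (fstPass op inv n step a)
  else a
termination_by (n - step).toNat
decreasing_by omega

-- fst(a, inv, op): transform, then for XOR inverse divide every entry by n
def fstA (op : String) (inv : Bool) (a : List Int) : List Int :=
  let n : Int := a.length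
  let a1 := fstWhile op inv n 1 a
  if inv && (op == "XOR") then a1.map (fun x => PySem.Int.floordiv x n) else a1

def subset_conv (a : List Int) (b : List Int) (op : String) : List Int :=
  let a1 := fstA op false a
  let b1 := fstA op false b
  -- for i in range(len(a)): a[i] *= b[i]   (exact under Pre_: len a ≤ len b)
  let p := List.zipWith (· * ·) a1 b1
  fstA op true p

-- ===== PORT B =====
def butterfly (op : String) (inv : Bool) (u : Int) (v : Int) : Int × Int :=
  if op == "AND" then (if inv then (v - u, u) else (v, u + v))
  else if op == "OR" then (if inv then (v, u - v) else (u + v, u))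
  else if op == "XOR" then (u + v, u - v)
  else (u, v)

def fstRec (op : String) (inv : Bool) (arr : List Int) : List Int :=
  if arr.length ≤ 1 then arr
  else
    let m := arr.length / 2
    let lo := fstRec op inv (List.take m arr)
    let hi := fstRec op inv (List.drop m arr)
    let ps := List.zipWith (butterfly op inv) lo hi
    ps.map Prod.fst ++ ps.map Prod.snd
termination_by arr.length
decreasing_by all_goals simp; omega

def subset_conv_alt (a : List Int) (b : List Int) (op : String) : List Int :=
  let fa := fstRec op false a
  let fb := fstRec op false b
  let prod := (fa.zip fb).map (fun p => p.1 * p.2)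
  let out := fstRec op true prod
  if op == "XOR" then out.map (fun x => PySem.Int.floordiv x (out.length : Int)) else out

-- ===== PRECONDITION & SPEC =====
-- Pre_ excludes exactly the inputs on which the Python A raises IndexError: a length that is
-- neither 0 nor a power of two makes fst index past the end, and len(a) > len(b) makes the
-- pointwise product read b[i] out of range.  On every other input A returns.
def Pre_subset_conv (a : List Int) (b : List Int) (op : String) : Prop :=
  (a.length = 0 ∨ ∃ k ≤ a.length, a.length = 2 ^ k) ∧
  (b.length = 0 ∨ ∃ k ≤ b.length, b.length = 2 ^ k) ∧
  a.length ≤ b.length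
instance (a : List Int) (b : List Int) (op : String) : Decidable (Pre_subset_conv a b op) := by
  unfold Pre_subset_conv; infer_instance
def pvWitness_subset_conv : List Int × List Int × String := ([1, 2], [3, 4], "AND")
def Spec_subset_conv (a : List Int) (b : List Int) (op : String) (out : List Int) : Prop := out = subset_conv_alt a b op
instance (a : List Int) (b : List Int) (op : String) (out : List Int) : Decidable (Spec_subset_conv a b op out) := by unfold Spec_subset_conv; infer_instance

-- ===== CLAIM (what is proved, stated in full; the proofs are below) =====
def Claim_equal_subset_conv : Prop := ∀ (a : List Int) (b : List Int) (op : String), Dom_subset_conv a b op → Pre_subset_conv a b op → Spec_subset_conv a b op (subset_conv a b op)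

-- ===== LEMMAS AND PROOFS =====

-- proof-side helpers: one pass over the array = the butterfly combine applied to each 2*step block
def blockComb (op : String) (inv : Bool) (s : Nat) (b : List Int) : List Int :=
  let ps := List.zipWith (butterfly op inv) (b.take s) (b.drop s)
  ps.map Prod.fst ++ ps.map Prod.snd

def chunkT (op : String) (inv : Bool) (s : Nat) : Nat → List Int → List Int
  | 0, a => a
  | k + 1, a => blockComb op inv s (a.take (2 * s)) ++ chunkT op inv s k (a.drop (2 * s))

-- generic: a foldl whose step preserves length preserves length
lemma foldl_length_inv {β : Type} (f : List Int → β → List Int)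
    (h : ∀ y x, (f y x).length = y.length) :
    ∀ (l : List β) (a : List Int), (l.foldl f a).length = a.length := by
  intro l
  induction l with
  | nil => intro a; rfl
  | cons x xs ih => intro a; simp [List.foldl, ih, h]

lemma fstBody_length (op : String) (inv : Bool) (step : Int) (a : List Int) (j : Int) :
    (fstBody op inv step a j).length = a.length := by
  unfold fstBody
  split_ifs <;> simp [PySem.List.length_pySetD]

lemma fstPass_length (op : String) (inv : Bool) (n step : Int) (a : List Int) :
    (fstPass op inv n step a).length = a.length := by
  unfold fstPass
  apply foldl_length_inv
  intro y x
  apply foldl_length_inv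
  intro y' x'
  exact fstBody_length ..

-- reading / writing at the junction of an append
lemma getD_at (pre l : List Int) (x : Int) : (pre ++ x :: l).getD pre.length 0 = x := by
  rw [List.getD_append_right _ _ _ _ (le_refl _)]
  simp

lemma set_at (pre l : List Int) (x y : Int) : (pre ++ x :: l).set pre.length y = pre ++ y :: l := by
  rw [List.set_append]
  simp

lemma set_getD_self (a : List Int) (n : Nat) : a.set n (a.getD n 0) = a := by
  apply List.ext_getElem?
  intro i
  rw [List.getElem?_set]
  split_ifs with h h2
  · subst h; simp [List.getElem?_eq_getElem h2, List.getD_eq_getElem?_getD]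
  · subst h; exact (List.getElem?_eq_none (by omega)).symm
  · rfl

-- the Int-indexed body at a natural position is a pure get/set butterfly
lemma fstBody_nat (op : String) (inv : Bool) (s c : Nat) (a : List Int) :
    fstBody op inv (s : Int) a (c : Int) =
      (a.set c (butterfly op inv (a.getD c 0) (a.getD (c + s) 0)).1).set (c + s)
        (butterfly op inv (a.getD c 0) (a.getD (c + s) 0)).2 := by
  have hcast : (c : Int) + (s : Int) = ((c + s : Nat) : Int) := by push_cast; ring
  simp only [fstBody, butterfly]
  rw [hcast]
  split_ifs <;> simp only [PySem.List.pyGetD_natCast, PySem.List.pySetD_natCast] <;>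
    first | rfl | rw [set_getD_self, set_getD_self]

-- one butterfly application at the junctions of an append decomposition
lemma body_step (op : String) (inv : Bool) (s : Nat) (pre l1 l2 : List Int) (u v : Int)
    (h : l1.length + 1 = s) :
    fstBody op inv (s : Int) (pre ++ u :: (l1 ++ v :: l2)) ((pre.length : Nat) : Int)
      = pre ++ (butterfly op inv u v).1 :: (l1 ++ (butterfly op inv u v).2 :: l2) := by
  rw [fstBody_nat]
  have hsplit : pre ++ u :: (l1 ++ v :: l2) = (pre ++ u :: l1) ++ v :: l2 := by simp
  have hlen : (pre ++ u :: l1).length = pre.length + s := by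
    simp [List.length_append]; omega
  have e1 : (pre ++ u :: (l1 ++ v :: l2)).getD pre.length 0 = u := getD_at ..
  have e2 : (pre ++ u :: (l1 ++ v :: l2)).getD (pre.length + s) 0 = v := by
    rw [hsplit, ← hlen]; exact getD_at ..
  rw [e1, e2, set_at]
  set X := (butterfly op inv u v).1 with hX
  set Y := (butterfly op inv u v).2 with hY
  have hsplit2 : pre ++ X :: (l1 ++ v :: l2) = (pre ++ X :: l1) ++ v :: l2 := by simp
  have hlen2 : (pre ++ X :: l1).length = pre.length + s := by
    simp [List.length_append]; omega
  rw [hsplit2, ← hlen2, set_at]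
  simp

-- the inner j-loop over one block
lemma inner_fold (op : String) (inv : Bool) (s : Nat) :
    ∀ (t : Nat) (pre lo mid hi post : List Int),
      lo.length = t → hi.length = t → mid.length + t = s →
      (List.range t).foldl (fun y dj => fstBody op inv (s : Int) y ((pre.length + dj : Nat) : Int))
          (pre ++ (lo ++ (mid ++ (hi ++ post))))
        = pre ++ ((List.zipWith (butterfly op inv) lo hi).map Prod.fst ++
            (mid ++ ((List.zipWith (butterfly op inv) lo hi).map Prod.snd ++ post))) := by
  intro t
  induction t with
  | zero =>
    intro pre lo mid hi post hlo hhi hs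
    rw [List.length_eq_zero_iff] at hlo hhi
    subst hlo; subst hhi
    simp
  | succ t ih =>
    intro pre lo mid hi post hlo hhi hs
    obtain ⟨u, lo', rfl⟩ : ∃ u lo', lo = u :: lo' := by
      cases lo with
      | nil => simp at hlo
      | cons u lo' => exact ⟨u, lo', rfl⟩
    obtain ⟨v, hi', rfl⟩ : ∃ v hi', hi = v :: hi' := by
      cases hi with
      | nil => simp at hhi
      | cons v hi' => exact ⟨v, hi', rfl⟩
    simp only [List.length_cons] at hlo hhi
    rw [List.range_succ_eq_map]
    simp only [List.foldl_cons, List.foldl_map, Nat.add_zero]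
    have shape : pre ++ (u :: lo' ++ (mid ++ (v :: hi' ++ post)))
        = pre ++ u :: ((lo' ++ mid) ++ v :: (hi' ++ post)) := by simp
    rw [shape, body_step op inv s pre (lo' ++ mid) (hi' ++ post) u v (by simp; omega)]
    set X := (butterfly op inv u v).1 with hX
    set Y := (butterfly op inv u v).2 with hY
    have shape2 : pre ++ X :: ((lo' ++ mid) ++ Y :: (hi' ++ post))
        = (pre ++ [X]) ++ (lo' ++ ((mid ++ [Y]) ++ (hi' ++ post))) := by simp
    rw [shape2]
    have hfun : ∀ (y : List Int) (dj : Nat), dj ∈ List.range t →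
        fstBody op inv (s : Int) y ((pre.length + dj.succ : Nat) : Int)
          = fstBody op inv (s : Int) y (((pre ++ [X]).length + dj : Nat) : Int) := by
      intro y dj _
      congr 1
      simp
      omega
    rw [PySem.List.foldl_congr_mem (List.range t) _ _ _ hfun]
    rw [ih (pre ++ [X]) lo' (mid ++ [Y]) hi' post (by omega) (by omega) (by simp; omega)]
    simp
    exact ⟨hX, hY⟩

-- the inner pyRange loop in fstPass, at a natural base index
lemma inner_pyRange (op : String) (inv : Bool) (s c : Nat) (x : List Int) :
    (PySem.List.pyRange (c : Int) ((c : Int) + (s : Int)) 1).foldl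
        (fun y j => fstBody op inv (s : Int) y j) x
      = (List.range s).foldl (fun y dj => fstBody op inv (s : Int) y ((c + dj : Nat) : Int)) x := by
  rw [PySem.List.pyRange_one]
  have : ((c : Int) + (s : Int) - (c : Int)).toNat = s := by omega
  rw [this, List.foldl_map]
  apply PySem.List.foldl_congr_mem
  intro acc k hk
  have : (c : Int) + (k : Int) = ((c + k : Nat) : Int) := by push_cast; ring
  rw [this]

-- the outer i-loop: one full pass = the combine on every 2*s block
lemma outer_fold (op : String) (inv : Bool) (s : Nat) (hs : 0 < s) :
    ∀ (k : Nat) (pre a : List Int), a.length = 2 * s * k →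
      ((List.range k).map (fun t => ((pre.length + 2 * s * t : Nat) : Int))).foldl
          (fun x i => (PySem.List.pyRange i (i + (s : Int)) 1).foldl
            (fun y j => fstBody op inv (s : Int) y j) x)
          (pre ++ a)
        = pre ++ chunkT op inv s k a := by
  intro k
  induction k with
  | zero =>
    intro pre a ha
    have : a = [] := List.length_eq_zero_iff.mp (by omega)
    subst this
    simp [chunkT]
  | succ k ih =>
    intro pre a ha
    have hs2 : a.length = 2 * s * k + 2 * s := by rw [ha]; ring
    have hsle : 2 * s ≤ a.length := by omega
    rw [List.range_succ_eq_map]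
    simp only [List.map_cons, List.map_map, List.foldl_cons, Nat.mul_zero, Nat.add_zero]
    rw [inner_pyRange op inv s pre.length]
    have hshape : pre ++ a
        = pre ++ (a.take s ++ ([] ++ ((a.drop s).take s ++ (a.drop s).drop s))) := by
      simp
    rw [hshape, inner_fold op inv s s pre (a.take s) [] ((a.drop s).take s) ((a.drop s).drop s)
      (by simp; omega) (by simp; omega) (by simp)]
    set Z := List.zipWith (butterfly op inv) (a.take s) ((a.drop s).take s) with hZ
    have hZlen : Z.length = s := by
      rw [hZ]; simp; omega
    have hshape2 : pre ++ (Z.map Prod.fst ++ ([] ++ (Z.map Prod.snd ++ (a.drop s).drop s)))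
        = (pre ++ (Z.map Prod.fst ++ Z.map Prod.snd)) ++ a.drop (2 * s) := by
      have : (a.drop s).drop s = a.drop (2 * s) := by
        rw [List.drop_drop]; congr 1; omega
      rw [this]; simp
    rw [hshape2]
    rw [List.foldl_map]
    have hfun : ∀ (x : List Int) (t : Nat), t ∈ List.range k →
        (PySem.List.pyRange ((pre.length + 2 * s * t.succ : Nat) : Int)
            (((pre.length + 2 * s * t.succ : Nat) : Int) + (s : Int)) 1).foldl
          (fun y j => fstBody op inv (s : Int) y j) x
        = (PySem.List.pyRange (((pre ++ (Z.map Prod.fst ++ Z.map Prod.snd)).length + 2 * s * t : Nat) : Int)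
            ((((pre ++ (Z.map Prod.fst ++ Z.map Prod.snd)).length + 2 * s * t : Nat) : Int) + (s : Int)) 1).foldl
          (fun y j => fstBody op inv (s : Int) y j) x := by
      intro x t _
      have : (pre.length + 2 * s * t.succ : Nat)
          = ((pre ++ (Z.map Prod.fst ++ Z.map Prod.snd)).length + 2 * s * t : Nat) := by
        simp [hZlen, Nat.succ_eq_add_one]
        ring
      rw [this]
    simp only [Function.comp_def]
    rw [PySem.List.foldl_congr_mem (List.range k) _ _ _ hfun]
    have ih' := ih (pre ++ (Z.map Prod.fst ++ Z.map Prod.snd)) (a.drop (2 * s)) (by simp [hs2])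
    rw [List.foldl_map] at ih'
    rw [ih']
    have hblock : Z.map Prod.fst ++ Z.map Prod.snd = blockComb op inv s (a.take (2 * s)) := by
      unfold blockComb
      have h1 : (a.take (2 * s)).take s = a.take s := by
        rw [List.take_take]; congr 1; omega
      have h2 : (a.take (2 * s)).drop s = (a.drop s).take s := by
        have h2s : 2 * s = s + s := by omega
        rw [h2s, List.drop_take]
        congr 1
        omega
      rw [h1, h2, ← hZ]
    rw [chunkT]
    rw [← hblock]
    simp

lemma fstPass_eq_chunkT (op : String) (inv : Bool) (s k : Nat) (hs : 0 < s)
    (a : List Int) (ha : a.length = 2 * s * k) :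
    fstPass op inv (a.length : Int) (s : Int) a = chunkT op inv s k a := by
  unfold fstPass
  have hS : (0:Int) < 2 * (s:Int) := by positivity
  have hn : PySem.List.pyRange 0 (a.length : Int) (2 * (s : Int))
      = (List.range k).map (fun t => (((@List.nil Int).length + 2 * s * t : Nat) : Int)) := by
    rw [PySem.List.pyRange_of_pos 0 _ hS]
    have hcount : (if (0:Int) < (a.length : Int) then
        (((a.length : Int) - 0 + 2 * (s:Int) - 1) / (2 * (s:Int))).toNat else 0) = k := by
      rcases Nat.eq_zero_or_pos k with hk | hk
      · subst hk
        have : a.length = 0 := by omega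
        simp [this]
      · have hpos : 0 < a.length := by
          rw [ha]; exact Nat.mul_pos (by omega) hk
        rw [if_pos (by exact_mod_cast hpos)]
        have hexp : (a.length : Int) - 0 + 2 * (s:Int) - 1
            = (2 * (s:Int) - 1) + (2 * (s:Int)) * (k : Int) := by
          rw [ha]; push_cast; ring
        rw [hexp, Int.add_mul_ediv_left _ _ (by omega)]
        rw [Int.ediv_eq_zero_of_lt (by omega) (by omega)]
        simp
    rw [hcount]
    apply List.map_congr_left
    intro t _
    simp only [List.length_nil, Nat.zero_add]
    push_cast
    ring
  rw [hn]
  have h := outer_fold op inv s hs k [] a ha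
  simpa using h

lemma chunkT_append (op : String) (inv : Bool) (s : Nat) :
    ∀ (k1 k2 : Nat) (lo hi : List Int), lo.length = 2 * s * k1 →
      chunkT op inv s (k1 + k2) (lo ++ hi) = chunkT op inv s k1 lo ++ chunkT op inv s k2 hi := by
  intro k1
  induction k1 with
  | zero =>
    intro k2 lo hi hlo
    have : lo = [] := List.length_eq_zero_iff.mp (by omega)
    subst this
    simp [chunkT]
  | succ k1 ih =>
    intro k2 lo hi hlo
    have hlo' : lo.length = 2 * s * k1 + 2 * s := by rw [hlo]; ring
    have hle : 2 * s ≤ lo.length := by omega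
    have hplus : k1 + 1 + k2 = (k1 + k2) + 1 := by omega
    rw [hplus, chunkT, chunkT]
    rw [List.take_append_of_le_length hle, List.drop_append_of_le_length hle]
    rw [ih k2 (lo.drop (2 * s)) hi (by simp [hlo'])]
    simp [List.append_assoc]

lemma blockComb_of_halves (op : String) (inv : Bool) (lo hi : List Int)
    (_h : lo.length = hi.length) :
    blockComb op inv lo.length (lo ++ hi) =
      (List.zipWith (butterfly op inv) lo hi).map Prod.fst ++
        (List.zipWith (butterfly op inv) lo hi).map Prod.snd := by
  unfold blockComb
  rw [List.take_left, List.drop_left]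

lemma fstWhile_split (op : String) (inv : Bool) :
    ∀ (r i k : Nat), i + r = k → ∀ (lo hi : List Int),
      lo.length = 2 ^ k → hi.length = 2 ^ k →
      fstWhile op inv ((2 ^ (k + 1) : Nat) : Int) ((2 ^ i : Nat) : Int) (lo ++ hi)
        = blockComb op inv (2 ^ k)
            (fstWhile op inv ((2 ^ k : Nat) : Int) ((2 ^ i : Nat) : Int) lo ++
             fstWhile op inv ((2 ^ k : Nat) : Int) ((2 ^ i : Nat) : Int) hi) := by
  intro r
  induction r with
  | zero =>
    intro i k hik lo hi hlo hhi
    have hik' : i = k := by omega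
    subst hik'
    have hstop : ∀ x : List Int,
        fstWhile op inv ((2 ^ i : Nat) : Int) ((2 ^ i : Nat) : Int) x = x := by
      intro x
      rw [fstWhile, dif_neg (by push_cast; omega)]
    rw [hstop, hstop]
    have hcond : (0:Int) < ((2 ^ i : Nat) : Int) ∧ ((2 ^ i : Nat) : Int) < ((2 ^ (i+1) : Nat) : Int) := by
      constructor
      · exact_mod_cast Nat.two_pow_pos i
      · exact_mod_cast Nat.pow_lt_pow_right (by omega) (by omega)
    rw [fstWhile, dif_pos hcond]
    have hdbl : 2 * ((2 ^ i : Nat) : Int) = ((2 ^ (i+1) : Nat) : Int) := by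
      push_cast [pow_succ]; ring
    rw [hdbl]
    rw [fstWhile, dif_neg (by push_cast; omega)]
    have hlen2 : (lo ++ hi).length = 2 ^ (i+1) := by
      simp [hlo, hhi, pow_succ]; ring
    rw [show ((2 ^ (i+1) : Nat) : Int) = (((lo ++ hi).length : Nat) : Int) by rw [hlen2]]
    rw [fstPass_eq_chunkT op inv (2 ^ i) 1 (Nat.two_pow_pos i) (lo ++ hi)
      (by rw [hlen2, pow_succ]; ring)]
    have h2p : 2 * 2 ^ i = 2 ^ (i+1) := by rw [pow_succ]; ring
    have ht : (lo ++ hi).take (2 * 2 ^ i) = lo ++ hi :=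
      List.take_of_length_le (by omega)
    have hd : (lo ++ hi).drop (2 * 2 ^ i) = [] :=
      List.drop_eq_nil_of_le (by omega)
    simp only [chunkT, ht, hd, List.append_nil]
  | succ r ihr =>
    intro i k hik lo hi hlo hhi
    have hpos : 0 < 2 ^ i := Nat.two_pow_pos i
    have hilt : i < k := by omega
    have hdbl : 2 * ((2 ^ i : Nat) : Int) = ((2 ^ (i+1) : Nat) : Int) := by
      push_cast [pow_succ]; ring
    have hlenLH : (lo ++ hi).length = 2 ^ (k+1) := by
      simp [hlo, hhi, pow_succ]; ring
    have hkk : 2 * 2 ^ i * 2 ^ (k - i) = 2 ^ (k + 1) := by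
      have e1 : 2 * 2 ^ i = 2 ^ (i + 1) := by rw [pow_succ]; ring
      rw [e1, ← pow_add]
      congr 1
      omega
    have hkk2 : 2 * 2 ^ i * 2 ^ (k - i - 1) = 2 ^ k := by
      have e1 : 2 * 2 ^ i = 2 ^ (i + 1) := by rw [pow_succ]; ring
      rw [e1, ← pow_add]
      congr 1
      omega
    have hsplitk : 2 ^ (k - i) = 2 ^ (k - i - 1) + 2 ^ (k - i - 1) := by
      have e : k - i = (k - i - 1) + 1 := by omega
      conv_lhs => rw [e]
      rw [pow_succ]
      ring
    have hpass : fstPass op inv ((2 ^ (k+1) : Nat) : Int) ((2 ^ i : Nat) : Int) (lo ++ hi)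
        = fstPass op inv ((2 ^ k : Nat) : Int) ((2 ^ i : Nat) : Int) lo ++
          fstPass op inv ((2 ^ k : Nat) : Int) ((2 ^ i : Nat) : Int) hi := by
      rw [show ((2 ^ (k+1) : Nat) : Int) = (((lo ++ hi).length : Nat) : Int) by rw [hlenLH]]
      rw [fstPass_eq_chunkT op inv (2 ^ i) (2 ^ (k - i)) hpos (lo ++ hi) (by rw [hlenLH, ← hkk])]
      rw [hsplitk, chunkT_append op inv (2 ^ i) (2 ^ (k - i - 1)) (2 ^ (k - i - 1)) lo hi
        (by rw [hlo, ← hkk2])]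
      rw [show ((2 ^ k : Nat) : Int) = ((lo.length : Nat) : Int) by rw [hlo],
        fstPass_eq_chunkT op inv (2 ^ i) (2 ^ (k - i - 1)) hpos lo (by rw [hlo, ← hkk2])]
      rw [show ((lo.length : Nat) : Int) = ((hi.length : Nat) : Int) by rw [hlo, hhi],
        fstPass_eq_chunkT op inv (2 ^ i) (2 ^ (k - i - 1)) hpos hi (by rw [hhi, ← hkk2])]
    have hcondL : (0:Int) < ((2 ^ i : Nat) : Int) ∧ ((2 ^ i : Nat) : Int) < ((2 ^ (k+1) : Nat) : Int) := by
      constructor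
      · exact_mod_cast hpos
      · exact_mod_cast Nat.pow_lt_pow_right (by omega) (by omega)
    have hcondS : (0:Int) < ((2 ^ i : Nat) : Int) ∧ ((2 ^ i : Nat) : Int) < ((2 ^ k : Nat) : Int) := by
      constructor
      · exact_mod_cast hpos
      · exact_mod_cast Nat.pow_lt_pow_right (by omega) hilt
    have hstep : ∀ x : List Int,
        fstWhile op inv ((2 ^ k : Nat) : Int) ((2 ^ i : Nat) : Int) x
          = fstWhile op inv ((2 ^ k : Nat) : Int) ((2 ^ (i+1) : Nat) : Int)
              (fstPass op inv ((2 ^ k : Nat) : Int) ((2 ^ i : Nat) : Int) x) := by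
      intro x
      rw [fstWhile, dif_pos hcondS, hdbl]
    rw [fstWhile, dif_pos hcondL, hdbl, hpass]
    rw [ihr (i+1) k (by omega) _ _
      (by rw [fstPass_length, hlo]) (by rw [fstPass_length, hhi])]
    rw [hstep lo, hstep hi]

lemma fstRec_length (op : String) (inv : Bool) :
    ∀ (k : Nat) (a : List Int), a.length = 2 ^ k → (fstRec op inv a).length = 2 ^ k := by
  intro k
  induction k with
  | zero =>
    intro a ha
    rw [fstRec]
    simp [ha]
  | succ k ih =>
    intro a ha
    have hpos : 0 < 2 ^ k := Nat.two_pow_pos k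
    have ha' : a.length = 2 * 2 ^ k := by rw [ha]; ring
    rw [fstRec, if_neg (by omega)]
    have hm : a.length / 2 = 2 ^ k := by omega
    have hlt : (a.take (a.length / 2)).length = 2 ^ k := by simp; omega
    have hld : (a.drop (a.length / 2)).length = 2 ^ k := by simp; omega
    simp only [List.length_append, List.length_map, List.length_zipWith,
      ih _ hlt, ih _ hld]
    rw [pow_succ]
    omega

lemma fstWhile_eq_fstRec (op : String) (inv : Bool) :
    ∀ (k : Nat) (a : List Int), a.length = 2 ^ k →
      fstWhile op inv ((2 ^ k : Nat) : Int) 1 a = fstRec op inv a := by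
  intro k
  induction k with
  | zero =>
    intro a ha
    rw [fstWhile, dif_neg (by norm_num)]
    rw [fstRec, if_pos (by omega)]
  | succ k ih =>
    intro a ha
    have hpos : 0 < 2 ^ k := Nat.two_pow_pos k
    have ha' : a.length = 2 * 2 ^ k := by rw [ha]; ring
    have hlo : (a.take (2 ^ k)).length = 2 ^ k := by simp; omega
    have hhi : (a.drop (2 ^ k)).length = 2 ^ k := by simp; omega
    have hsplit := fstWhile_split op inv k 0 k (by omega) (a.take (2 ^ k)) (a.drop (2 ^ k)) hlo hhi
    rw [List.take_append_drop] at hsplit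
    have h1 : ((2 ^ 0 : Nat) : Int) = 1 := by norm_num
    rw [h1] at hsplit
    rw [hsplit, ih _ hlo, ih _ hhi]
    set X := fstRec op inv (a.take (2 ^ k)) with hX
    set Y := fstRec op inv (a.drop (2 ^ k)) with hY
    have hXlen : X.length = 2 ^ k := fstRec_length op inv k _ hlo
    have hYlen : Y.length = 2 ^ k := fstRec_length op inv k _ hhi
    rw [show (2:Nat) ^ k = X.length from hXlen.symm]
    rw [blockComb_of_halves op inv X Y (by rw [hXlen, hYlen])]
    conv_rhs => rw [fstRec]
    rw [if_neg (by omega : ¬ a.length ≤ 1)]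
    have hm : a.length / 2 = 2 ^ k := by omega
    simp only [hm]
    rw [← hX, ← hY]

-- lift to fst on a power-of-two (or empty) list
lemma fstWhile_top (op : String) (inv : Bool) (a : List Int)
    (h : a.length = 0 ∨ ∃ k ≤ a.length, a.length = 2 ^ k) :
    fstWhile op inv (a.length : Int) 1 a = fstRec op inv a := by
  rcases h with h0 | ⟨k, _, hk⟩
  · have : a = [] := List.length_eq_zero_iff.mp h0
    subst this
    rw [fstWhile, fstRec]
    simp
  · rw [hk]
    exact fstWhile_eq_fstRec op inv k a hk

lemma zip_map_mul (fa fb : List Int) :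
    (fa.zip fb).map (fun p => p.1 * p.2) = List.zipWith (· * ·) fa fb := by
  rw [← List.map_uncurry_zip_eq_zipWith]
  rfl

lemma fstRec_len' (op : String) (inv : Bool) (a : List Int)
    (h : a.length = 0 ∨ ∃ k ≤ a.length, a.length = 2 ^ k) :
    (fstRec op inv a).length = a.length := by
  rcases h with h0 | ⟨k, _, hk⟩
  · have : a = [] := List.length_eq_zero_iff.mp h0
    subst this
    rw [fstRec]
    simp
  · rw [hk]
    exact fstRec_length op inv k a hk

-- ===== VERDICT (by name: the statement is the Claim_ definition above) =====
theorem subset_conv_spec : Claim_equal_subset_conv := by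
  intro a b op hdom hpre
  obtain ⟨ha, hb, hab⟩ := hpre
  unfold Spec_subset_conv subset_conv subset_conv_alt fstA
  simp only [Bool.false_and, Bool.true_and, if_false, Bool.false_eq_true]
  rw [fstWhile_top op false a ha, fstWhile_top op false b hb]
  rw [zip_map_mul]
  set p := List.zipWith (· * ·) (fstRec op false a) (fstRec op false b) with hp
  have hplen : p.length = a.length := by
    rw [hp, List.length_zipWith, fstRec_len' op false a ha, fstRec_len' op false b hb]
    omega
  have hppre : p.length = 0 ∨ ∃ k ≤ p.length, p.length = 2 ^ k := by
    rw [hplen]; exact ha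
  rw [fstWhile_top op true p hppre]
  have hout : (fstRec op true p).length = p.length := fstRec_len' op true p hppre
  rw [hout]
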